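-- pv_equiv track=rewrite | github.com/Fondamenti18/fondamenti-di-programmazione | students/1797137/homework01/program03.py | genchiave
-- ===== SOURCE A (Python) =====
-- def genchiave(chiave):
--
--     disordinata=[]
--     disordinataspec=[]
--     ordinata=[]
--
--     chiave=list(chiave)
--
--     ''' fuori range '''
--     for i in range(len(chiave)-1,-1,-1):
--         if chiave[i]<'a' or chiave[i]>'z' :
--             del chiave[i]
--
--     ''' disordinata '''
--     for i in range(len(chiave)-1,-1,-1):
--         c=0
--         for j in range(len(disordinataspec)-1,-1,-1):
--             if chiave[i]==disordinataspec[j]: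
--                 c=1
--         if c==0:
--             disordinataspec=disordinataspec+list(chiave[i])
--
--     ''' inverti disordinataspec '''
--     for i in range(0,len(disordinataspec)):
--         disordinata=list(disordinataspec[i])+disordinata
--
--     ''' ordinata '''
--     ordinata=sorted(disordinata)
--
--     return disordinata,ordinata
-- ===== SOURCE B (Python) =====
-- def genchiave(chiave):
--     low = [c for c in chiave if 'a' <= c <= 'z']
--     last = {}
--     for i, c in enumerate(low):
--         last[c] = i
--     disordinata = sorted(last, key=last.get)
--     return disordinata, sorted(disordinata)
-- ===== Notes on version B (the rewrite author's own statement) =====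
-- stated objective: alternative
-- what changed: A's reverse-traversal dedup with a quadratic inner membership scan plus a manual reversal loop is replaced by one enumerate pass building a char-to-last-index dict and a stable sort of its keys by that index.
import Mathlib
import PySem

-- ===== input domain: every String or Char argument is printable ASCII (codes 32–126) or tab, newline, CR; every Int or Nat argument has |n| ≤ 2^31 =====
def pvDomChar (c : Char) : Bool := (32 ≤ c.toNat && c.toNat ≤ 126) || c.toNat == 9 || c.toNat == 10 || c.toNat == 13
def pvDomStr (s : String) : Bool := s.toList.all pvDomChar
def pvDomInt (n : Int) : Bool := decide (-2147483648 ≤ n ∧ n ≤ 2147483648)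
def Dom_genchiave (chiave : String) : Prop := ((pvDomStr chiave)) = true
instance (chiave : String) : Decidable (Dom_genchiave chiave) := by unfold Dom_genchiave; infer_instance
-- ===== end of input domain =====

-- B replaces A's reverse-traversal dedup (quadratic inner membership scan) plus manual reversal by a
-- last-occurrence index table built in one pass and a sort of the keys by that index; objective: alternative.

-- ===== PORT A =====
-- A's first loop deletes non-lowercase chars in place scanning right-to-left; each element is decided
-- independently of the others, so the right fold below is exact.
def genchiave (chiave : String) : List String × List String :=
  let cs : List Char := chiave.toList
  let cs2 : List Char := cs.foldr (fun c acc => if c < 'a' ∨ 'z' < c then acc else c :: acc) []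
  -- second loop: i from the end down to 0, inner flag scan j over disordinataspec from its end
  let spec : List Char := cs2.reverse.foldl (fun spec c =>
      let flag : Nat := spec.reverse.foldl (fun fl s => if c = s then 1 else fl) 0
      if flag = 0 then spec ++ [c] else spec) []
  -- third loop: prepend each element of disordinataspec
  let disordinata : List Char := spec.foldl (fun acc c => [c] ++ acc) []
  let dStr : List String := disordinata.map (fun c => String.mk [c])
  (dStr, PySem.List.sorted dStr (fun x => x))

-- ===== PORT B =====
-- Source B: filter lowercase, build a dict mapping each char to its LAST index in one enumerate pass,
-- then sort the dict's keys by that index (key=last.get; every key is present, so .get is its value,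
-- ported as getD with an unused default).
def genchiave_alt (chiave : String) : List String × List String :=
  let low : List Char := chiave.toList.filter (fun c => 'a' ≤ c && c ≤ 'z')
  let last : PySem.Dict Char Int :=
    (PySem.List.enumerate low).foldl (fun d p => d.insert p.2 p.1) PySem.Dict.empty
  let disordinata : List Char := PySem.List.sorted last.keys (fun c => last.getD c 0)
  let dStr : List String := disordinata.map (fun c => String.mk [c])
  (dStr, PySem.List.sorted dStr (fun x => x))

-- ===== PRECONDITION & SPEC =====
def Spec_genchiave (chiave : String) (out : List String × List String) : Prop := out = genchiave_alt chiave
instance (chiave : String) (out : List String × List String) : Decidable (Spec_genchiave chiave out) := by unfold Spec_genchiave; infer_instance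

-- ===== CLAIM (what is proved, stated in full; the proofs are below) =====
def Claim_equal_genchiave : Prop := ∀ (chiave : String), Dom_genchiave chiave → Spec_genchiave chiave (genchiave chiave)

-- ===== LEMMAS AND PROOFS =====

-- the append-if-new dedup step both algorithms revolve around
def pvStep (s : List Char) (c : Char) : List Char := if c ∈ s then s else s ++ [c]

-- the last-occurrence dict B builds over a char list
def pvDl (l : List Char) : PySem.Dict Char Int :=
  (PySem.List.enumerate l).foldl (fun d p => d.insert p.2 p.1) PySem.Dict.empty

-- the char sequence A's three loops produce from the filtered list
def pvG (l : List Char) : List Char := (PySem.List.dedup l.reverse).reverse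

-- A's inner flag scan is a membership test
theorem pv_flag (c : Char) (r : List Char) (z : Nat) :
    r.foldl (fun fl s => if c = s then 1 else fl) z = if c ∈ r then 1 else z := by
  induction r generalizing z with
  | nil => simp
  | cons s r ih =>
    simp only [List.foldl_cons, ih]
    by_cases h1 : c ∈ r <;> by_cases h2 : c = s <;> simp [h1, h2]

-- A's dedup fold is the Set.ofList fold
theorem pv_foldl_step (r s : List Char) :
    r.foldl pvStep s = List.foldl PySem.Set.add s r := by
  induction r generalizing s with
  | nil => rfl
  | cons c r ih =>
    simp only [List.foldl_cons, ih]
    congr 1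
    simp [pvStep, PySem.Set.add]

theorem pv_foldl_step_dedup (r : List Char) :
    r.foldl pvStep [] = PySem.List.dedup r := by
  rw [pv_foldl_step]; rfl

theorem pv_foldl_step_eq (r s : List Char) :
    r.foldl pvStep s = s ++ (PySem.List.dedup r).filter (fun c => decide (c ∉ s)) := by
  induction r generalizing s with
  | nil => simp
  | cons y r ih =>
    have hd : PySem.List.dedup (y :: r) = pvStep [] y ++ (PySem.List.dedup r).filter (fun c => decide (c ∉ pvStep [] y)) := by
      rw [← pv_foldl_step_dedup (y :: r), List.foldl_cons, ih]
    rw [List.foldl_cons, ih (pvStep s y), hd]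
    have hy0 : pvStep [] y = [y] := by simp [pvStep]
    rw [hy0]
    by_cases hy : y ∈ s
    · have hs : pvStep s y = s := by simp [pvStep, hy]
      rw [hs, List.filter_append, List.filter_filter]
      have h1 : List.filter (fun c => decide (c ∉ s)) [y] = [] := by simp [hy]
      rw [h1, List.nil_append]
      congr 1
      apply List.filter_congr
      intro c _
      by_cases hcs : c ∈ s
      · simp [hcs]
      · have hcy : c ≠ y := fun h => hcs (h ▸ hy)
        simp [hcs, hcy]
    · have hs : pvStep s y = s ++ [y] := by simp [pvStep, hy]
      rw [hs, List.filter_append, List.filter_filter]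
      have h1 : List.filter (fun c => decide (c ∉ s)) [y] = [y] := by simp [hy]
      rw [h1, List.append_assoc]
      congr 1
      congr 1
      apply List.filter_congr
      intro c _
      by_cases hcs : c ∈ s <;> by_cases hcy : c = y <;> simp [hcs, hcy]

-- cons characterization of Python's dedup (first occurrences)
theorem pv_dedup_cons (y : Char) (r : List Char) :
    PySem.List.dedup (y :: r) = y :: (PySem.List.dedup r).filter (fun c => decide (c ≠ y)) := by
  rw [← pv_foldl_step_dedup (y :: r), List.foldl_cons, pv_foldl_step_eq]
  have hy0 : pvStep [] y = [y] := by simp [pvStep]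
  rw [hy0]
  simp

-- enumerate over a snoc
theorem pv_enumerate_snoc (t : List Char) (x : Char) (s : Int) :
    PySem.List.enumerate (t ++ [x]) s = PySem.List.enumerate t s ++ [(s + t.length, x)] := by
  induction t generalizing s with
  | nil => simp [PySem.List.enumerate]
  | cons a t ih => simp [PySem.List.enumerate, ih, add_assoc]; ring_nf

theorem pv_Dl_snoc (t : List Char) (x : Char) :
    pvDl (t ++ [x]) = (pvDl t).insert x t.length := by
  unfold pvDl
  rw [pv_enumerate_snoc, List.foldl_append]
  simp

-- keys of an insert: unchanged when present, appended when new
theorem pv_keys_insert (d : PySem.Dict Char Int) (k : Char) (v : Int) :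
    (d.insert k v).keys = if k ∈ d.keys then d.keys else d.keys ++ [k] := by
  have hmem : d.contains k = true ↔ k ∈ d.keys := by
    simp [PySem.Dict.contains, PySem.Dict.keys, List.any_eq_true, List.mem_map]
  by_cases h : d.contains k = true
  · rw [if_pos (hmem.mp h)]
    simp only [PySem.Dict.insert, if_pos h, PySem.Dict.keys, List.map_map]
    apply List.map_congr_left
    intro p _
    by_cases hpk : p.1 = k
    · simp [hpk]
    · simp [hpk]
  · rw [if_neg (fun hk => h (hmem.mpr hk))]
    simp [PySem.Dict.insert, h, PySem.Dict.keys]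

theorem pv_keys_Dl (l : List Char) : (pvDl l).keys = PySem.List.dedup l := by
  induction l using List.reverseRecOn with
  | nil => rfl
  | append_singleton t x ih =>
    rw [pv_Dl_snoc, pv_keys_insert, ih,
        ← pv_foldl_step_dedup (t ++ [x]), List.foldl_append, pv_foldl_step_dedup]
    simp [pvStep]

theorem pv_getD_Dl_lt (l : List Char) (c : Char) (hc : c ∈ l) :
    (pvDl l).getD c 0 < (l.length : Int) := by
  induction l using List.reverseRecOn with
  | nil => simp at hc
  | append_singleton t x ih =>
    rw [pv_Dl_snoc, PySem.Dict.getD_insert]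
    by_cases hcx : c = x
    · rw [if_pos hcx]; simp
    · rw [if_neg hcx]
      have hct : c ∈ t := by
        rcases List.mem_append.mp hc with h | h
        · exact h
        · exact absurd (List.mem_singleton.mp h) hcx
      have := ih hct
      simp only [List.length_append, List.length_cons, List.length_nil]
      push_cast
      omega

theorem pv_G_snoc (t : List Char) (x : Char) :
    pvG (t ++ [x]) = (pvG t).filter (fun c => decide (c ≠ x)) ++ [x] := by
  unfold pvG
  rw [List.reverse_append, List.reverse_singleton, List.singleton_append, pv_dedup_cons,
      List.reverse_cons, List.filter_reverse]

theorem pv_G_nodup (l : List Char) : (pvG l).Nodup := by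
  unfold pvG
  rw [List.nodup_reverse, PySem.List.dedup_eq_ofList]
  exact PySem.Set.nodup_ofList _

theorem pv_G_mem (l : List Char) (c : Char) : c ∈ pvG l ↔ c ∈ l := by
  unfold pvG
  rw [List.mem_reverse, PySem.List.dedup_eq_ofList, PySem.Set.mem_ofList, List.mem_reverse]

theorem pv_G_pairwise (l : List Char) :
    (pvG l).Pairwise (fun a b => (pvDl l).getD a 0 < (pvDl l).getD b 0) := by
  induction l using List.reverseRecOn with
  | nil => simp [pvG, PySem.List.dedup, PySem.Set.ofList]
  | append_singleton t x ih =>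
    rw [pv_G_snoc]
    have hmemf : ∀ a, a ∈ (pvG t).filter (fun c => decide (c ≠ x)) → a ∈ t ∧ a ≠ x := by
      intro a ha
      rcases List.mem_filter.mp ha with ⟨hmem, hne⟩
      exact ⟨(pv_G_mem t a).mp hmem, by simpa using hne⟩
    rw [List.pairwise_append]
    refine ⟨?_, List.pairwise_singleton _ _, ?_⟩
    · have hp : ((pvG t).filter (fun c => decide (c ≠ x))).Pairwise
          (fun a b => (pvDl t).getD a 0 < (pvDl t).getD b 0) :=
        ih.sublist List.filter_sublist
      refine hp.imp_of_mem ?_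
      intro a b ha hb hab
      rw [pv_Dl_snoc, PySem.Dict.getD_insert, PySem.Dict.getD_insert,
          if_neg (hmemf a ha).2, if_neg (hmemf b hb).2]
      exact hab
    · intro a ha b hb
      rw [List.mem_singleton.mp hb]
      rw [pv_Dl_snoc, PySem.Dict.getD_insert, PySem.Dict.getD_insert,
          if_neg (hmemf a ha).2, if_pos rfl]
      exact pv_getD_Dl_lt t a (hmemf a ha).1

theorem pv_main (l : List Char) :
    PySem.List.sorted (pvDl l).keys (fun c => (pvDl l).getD c 0) = pvG l := by
  apply PySem.List.sorted_eq_of_perm_of_pairwise_lt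
  · rw [pv_keys_Dl]
    rw [List.perm_ext_iff_of_nodup (pv_G_nodup l)
        (by rw [PySem.List.dedup_eq_ofList]; exact PySem.Set.nodup_ofList l)]
    intro a
    rw [pv_G_mem, PySem.List.dedup_eq_ofList, PySem.Set.mem_ofList]
  · exact pv_G_pairwise l

theorem pv_filter_eq (cs : List Char) :
    cs.foldr (fun c acc => if c < 'a' ∨ 'z' < c then acc else c :: acc) [] =
      cs.filter (fun c => 'a' ≤ c && c ≤ 'z') := by
  induction cs with
  | nil => rfl
  | cons c cs ih =>
    simp only [List.foldr_cons, List.filter_cons, ih]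
    by_cases h1 : 'a' ≤ c <;> by_cases h2 : c ≤ 'z'
    · rw [if_neg (by simp [not_lt.mpr h1, not_lt.mpr h2]), if_pos (by simp [h1, h2])]
    · rw [if_pos (Or.inr (not_le.mp h2)), if_neg (by simp [h2])]
    · rw [if_pos (Or.inl (not_le.mp h1)), if_neg (by simp [h1])]
    · rw [if_pos (Or.inl (not_le.mp h1)), if_neg (by simp [h1])]

theorem pv_rev (l acc : List Char) :
    l.foldl (fun acc c => [c] ++ acc) acc = l.reverse ++ acc := by
  induction l generalizing acc with
  | nil => simp
  | cons c l ih => rw [List.foldl_cons, ih]; simp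

-- A's second-plus-third loops over a list l compute pvG l
theorem pv_A_disordinata (l : List Char) :
    (l.reverse.foldl (fun spec c =>
        if (spec.reverse.foldl (fun fl s => if c = s then 1 else fl) 0) = 0
        then spec ++ [c] else spec) []).foldl (fun acc c => [c] ++ acc) [] = pvG l := by
  have hstep : (fun (spec : List Char) c =>
      if (spec.reverse.foldl (fun fl s => if c = s then 1 else fl) 0) = 0
      then spec ++ [c] else spec) = pvStep := by
    funext spec c
    rw [pv_flag]
    by_cases h : c ∈ spec.reverse
    · rw [List.mem_reverse] at h; simp [h, pvStep]
    · rw [List.mem_reverse] at h; simp [h, pvStep]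
  rw [hstep, pv_rev, pv_foldl_step_dedup, List.append_nil]
  rfl

-- ===== VERDICT (by name: the statement is the Claim_ definition above) =====
theorem genchiave_spec : Claim_equal_genchiave := by
  intro chiave _
  show genchiave chiave = genchiave_alt chiave
  simp only [genchiave, genchiave_alt]
  rw [pv_filter_eq]
  rw [pv_A_disordinata]
  rw [show (PySem.List.enumerate (chiave.toList.filter (fun c => 'a' ≤ c && c ≤ 'z'))).foldl
        (fun d p => d.insert p.2 p.1) PySem.Dict.empty
      = pvDl (chiave.toList.filter (fun c => 'a' ≤ c && c ≤ 'z')) from rfl]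
  rw [pv_main]
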